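-- pv_equiv track=rewrite | github.com/andy814/LeetCode | Contest/LeetCodeW283.py | minimalKSum
-- ===== SOURCE A (Python) =====
-- from typing import List
--
-- def minimalKSum(nums: List[int], k: int) -> int:
--     firstKSum=(k)*(k+1)//2
--     curr=k+1
--     kSum=firstKSum
--     numsSet=set(nums)
--     for num in numsSet:
--         if num<=k:
--             kSum-=num
--             while curr in numsSet:
--                 curr+=1
--             kSum+=curr
--             curr+=1
--     return kSum
-- ===== SOURCE B (Python) =====
-- from typing import List
--
-- def minimalKSum(nums: List[int], k: int) -> int:
--     present = sorted(set(nums))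
--     low = [x for x in present if x <= k]
--     big = [x for x in present if x > k]
--     total = k * (k + 1) // 2 - sum(low)
--     start, remaining = k + 1, len(low)
--     for x in big:
--         if remaining == 0:
--             break
--         take = min(x - start, remaining)
--         total += take * (2 * start + take - 1) // 2
--         remaining -= take
--         start = x + 1
--     if remaining:
--         total += remaining * (2 * start + remaining - 1) // 2
--     return total
-- ===== Notes on version B (the rewrite author's own statement) =====
-- stated objective: alternative
-- what changed: A walks a pointer one integer at a time past set members to pick each replacement; B sorts the distinct values once, subtracts the <=k part in one pass, then jumps gap-by-gap over the sorted values >k adding closed-form arithmetic-series sums for whole blocks of missing integers.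
import Mathlib
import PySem

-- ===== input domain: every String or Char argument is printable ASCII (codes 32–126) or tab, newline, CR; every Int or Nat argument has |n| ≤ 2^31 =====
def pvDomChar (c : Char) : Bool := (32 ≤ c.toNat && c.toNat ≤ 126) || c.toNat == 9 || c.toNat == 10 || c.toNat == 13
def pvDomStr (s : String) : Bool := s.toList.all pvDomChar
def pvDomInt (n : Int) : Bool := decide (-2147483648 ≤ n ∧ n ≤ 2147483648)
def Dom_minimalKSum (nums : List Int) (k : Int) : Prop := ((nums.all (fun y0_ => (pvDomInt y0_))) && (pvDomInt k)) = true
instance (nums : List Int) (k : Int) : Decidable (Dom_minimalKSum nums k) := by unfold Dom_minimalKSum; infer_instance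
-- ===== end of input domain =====

-- B replaces A's one-by-one pointer walk over set members with sorted block-jumping and
-- closed-form arithmetic-series sums (objective: alternative algorithm; same return value).

-- ===== PORT A =====
-- 'while curr in numsSet: curr += 1' — fuel-bounded walk; fuel s.length+1 always suffices
def skipGo (s : List Int) (curr : Int) : Nat → Int
  | 0 => curr
  | n + 1 => if curr ∈ s then skipGo s (curr + 1) n else curr

def skipA (s : List Int) (curr : Int) : Int := skipGo s curr (s.length + 1)

def stepA (s : List Int) (k : Int) (st : Int × Int) (num : Int) : Int × Int :=
  if num ≤ k then
    let m := skipA s st.1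
    (m + 1, st.2 - num + m)
  else st

def minimalKSum (nums : List Int) (k : Int) : Int :=
  let numsSet := PySem.Set.ofList nums
  (numsSet.foldl (stepA numsSet k) (k + 1, PySem.Int.floordiv (k * (k + 1)) 2)).2

-- ===== PORT B =====
-- the 'for x in big' loop of Source B, with the trailing 'if remaining:' block at loop exit
def bloop : List Int → Int → Int → Int → Int
  | [], total, start, remaining =>
      if remaining ≠ 0 then
        total + PySem.Int.floordiv (remaining * (2 * start + remaining - 1)) 2
      else total
  | x :: bs, total, start, remaining =>
      if remaining = 0 then total
      else
        let take := min (x - start) remaining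
        bloop bs (total + PySem.Int.floordiv (take * (2 * start + take - 1)) 2)
          (x + 1) (remaining - take)

def minimalKSum_alt (nums : List Int) (k : Int) : Int :=
  let present := PySem.List.sorted (PySem.Set.ofList nums) (fun x => x) false
  let low := present.filter (fun x => decide (x ≤ k))
  let big := present.filter (fun x => decide (k < x))
  bloop big (PySem.Int.floordiv (k * (k + 1)) 2 - low.sum) (k + 1) (low.length : Int)

-- ===== PRECONDITION & SPEC =====
def Spec_minimalKSum (nums : List Int) (k : Int) (out : Int) : Prop := out = minimalKSum_alt nums k
instance (nums : List Int) (k : Int) (out : Int) : Decidable (Spec_minimalKSum nums k out) := by unfold Spec_minimalKSum; infer_instance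

-- ===== CLAIM (what is proved, stated in full; the proofs are below) =====
def Claim_equal_minimalKSum : Prop := ∀ (nums : List Int) (k : Int), Dom_minimalKSum nums k → Spec_minimalKSum nums k (minimalKSum nums k)

-- ===== LEMMAS AND PROOFS =====

-- sum of the first c integers ≥ curr that are missing from s (the values A's walk adds)
def takeMiss (s : List Int) (curr : Int) : Nat → Int
  | 0 => 0
  | c + 1 => skipA s curr + takeMiss s (skipA s curr + 1) c

theorem takeMiss_zero (s : List Int) (curr : Int) : takeMiss s curr 0 = 0 := rfl

theorem skipGo_spec (s : List Int) : ∀ (fuel : Nat) (curr : Int),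
    (s.filter (fun x => decide (curr ≤ x))).length < fuel →
    skipGo s curr fuel ∉ s ∧ curr ≤ skipGo s curr fuel ∧
      ∀ x, curr ≤ x → x < skipGo s curr fuel → x ∈ s := by
  intro fuel
  induction fuel with
  | zero => intro curr h; omega
  | succ n ih =>
    intro curr h
    by_cases hc : curr ∈ s
    · have hsub : List.Sublist (s.filter (fun x => decide (curr + 1 ≤ x)))
          (s.filter (fun x => decide (curr ≤ x))) := by
        apply List.monotone_filter_right
        intro x hx; simp at hx ⊢; omega
      have hlt : (s.filter (fun x => decide (curr + 1 ≤ x))).length <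
          (s.filter (fun x => decide (curr ≤ x))).length := by
        rcases Nat.lt_or_ge (s.filter (fun x => decide (curr + 1 ≤ x))).length
            (s.filter (fun x => decide (curr ≤ x))).length with h' | h'
        · exact h'
        · exfalso
          have heq := hsub.eq_of_length (Nat.le_antisymm hsub.length_le h')
          have hmem : curr ∈ s.filter (fun x => decide (curr ≤ x)) := by
            simp [hc]
          rw [← heq] at hmem
          simp at hmem
      have ih' := ih (curr + 1) (by omega)
      refine ⟨?_, ?_, ?_⟩
      · simpa [skipGo, hc] using ih'.1
      · have := ih'.2.1; simp [skipGo, hc]; omega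
      · intro x hx1 hx2
        simp only [skipGo, if_pos hc] at hx2
        rcases eq_or_lt_of_le hx1 with h1 | h1
        · exact h1 ▸ hc
        · exact ih'.2.2 x (by omega) hx2
    · simp [skipGo, hc]
      intro x h1 h2; omega

theorem skipA_spec (s : List Int) (curr : Int) :
    skipA s curr ∉ s ∧ curr ≤ skipA s curr ∧
      ∀ x, curr ≤ x → x < skipA s curr → x ∈ s := by
  apply skipGo_spec
  have := List.length_filter_le (fun x => decide (curr ≤ x)) s
  omega

theorem skipA_eq_of (s : List Int) (curr m : Int) (h1 : m ∉ s) (h2 : curr ≤ m)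
    (h3 : ∀ x, curr ≤ x → x < m → x ∈ s) : skipA s curr = m := by
  obtain ⟨g1, g2, g3⟩ := skipA_spec s curr
  rcases lt_trichotomy (skipA s curr) m with h | h | h
  · exact absurd (h3 _ g2 h) g1
  · exact h
  · exact absurd (g3 _ h2 h) h1

theorem skipA_congr (s t : List Int) (curr : Int)
    (h : ∀ x, curr ≤ x → (x ∈ s ↔ x ∈ t)) : skipA s curr = skipA t curr := by
  obtain ⟨g1, g2, g3⟩ := skipA_spec t curr
  exact skipA_eq_of s curr _ (fun hm => g1 ((h _ g2).mp hm))
    g2 (fun x hx1 hx2 => (h x hx1).mpr (g3 x hx1 hx2))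

theorem takeMiss_congr (s t : List Int) :
    ∀ (c : Nat) (curr : Int), (∀ x, curr ≤ x → (x ∈ s ↔ x ∈ t)) →
    takeMiss s curr c = takeMiss t curr c := by
  intro c
  induction c with
  | zero => intro curr _; rfl
  | succ n ih =>
    intro curr h
    have hsk : skipA s curr = skipA t curr := skipA_congr s t curr h
    have hge := (skipA_spec t curr).2.1
    simp only [takeMiss, hsk]
    congr 1
    exact ih _ (fun x hx => h x (by omega))

theorem takeMiss_mem_head (s : List Int) (x : Int) (c : Nat) (hx : x ∈ s) :
    takeMiss s x c = takeMiss s (x + 1) c := by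
  cases c with
  | zero => rfl
  | succ n =>
    have hsk : skipA s x = skipA s (x + 1) := by
      obtain ⟨g1, g2, g3⟩ := skipA_spec s (x + 1)
      apply skipA_eq_of s x _ g1 (by omega)
      intro y hy1 hy2
      rcases eq_or_lt_of_le hy1 with h1 | h1
      · exact h1 ▸ hx
      · exact g3 y (by omega) hy2
    simp only [takeMiss, hsk]

theorem sum_range_shift (start : Int) (n : Nat) :
    (∑ i ∈ Finset.range (n + 1), (start + (i : Int))) =
      start + ∑ i ∈ Finset.range n, (start + 1 + (i : Int)) := by
  induction n with
  | zero => simp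
  | succ m ihm =>
    rw [Finset.sum_range_succ, ihm, Finset.sum_range_succ]
    push_cast; ring

-- splitting off a block of integers none of which is in s
theorem takeMiss_free (s : List Int) :
    ∀ (a : Nat) (start : Int) (b : Nat),
    (∀ y, start ≤ y → y < start + a → y ∉ s) →
    takeMiss s start (a + b) = (∑ i ∈ Finset.range a, (start + (i : Int))) +
      takeMiss s (start + a) b := by
  intro a
  induction a with
  | zero => intro start b _; simp
  | succ n ih =>
    intro start b hfree
    have hs : skipA s start = start := by
      apply skipA_eq_of s start start (hfree start le_rfl (by omega)) le_rfl
      intro x h1 h2; omega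
    have : n + 1 + b = (n + b) + 1 := by omega
    rw [this]
    simp only [takeMiss, hs]
    rw [ih (start + 1) b (by intro y h1 h2; exact hfree y (by omega) (by push_cast at h2 ⊢; omega))]
    rw [sum_range_shift]
    have : start + 1 + (n : Int) = start + ((n : Nat) + 1 : Nat) := by push_cast; ring
    rw [this]
    ring

theorem series_closed (start : Int) (a : Nat) :
    PySem.Int.floordiv ((a : Int) * (2 * start + (a : Int) - 1)) 2 =
      ∑ i ∈ Finset.range a, (start + (i : Int)) := by
  have h2 : 2 * (∑ i ∈ Finset.range a, (start + (i : Int))) =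
      (a : Int) * (2 * start + (a : Int) - 1) := by
    induction a with
    | zero => simp
    | succ n ih =>
      rw [Finset.sum_range_succ, mul_add, ih]
      push_cast; ring
  rw [← h2, PySem.Int.floordiv_eq_ediv_of_pos (by norm_num)]
  exact Int.mul_ediv_cancel_left _ (by norm_num)

theorem bloop_zero (bs : List Int) (total start : Int) : bloop bs total start 0 = total := by
  cases bs <;> simp [bloop]

theorem bloop_eq (bs : List Int) : ∀ (total start : Int) (c : Nat),
    bs.Pairwise (· < ·) → (∀ x ∈ bs, start ≤ x) →
    bloop bs total start (c : Int) = total + takeMiss bs start c := by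
  induction bs with
  | nil =>
    intro total start c _ _
    cases c with
    | zero => simp [bloop, takeMiss]
    | succ n =>
      have hne : ((n + 1 : Nat) : Int) ≠ 0 := by push_cast; omega
      have hfree : ∀ y, start ≤ y → y < start + ((n + 1 : Nat) : Int) → y ∉ ([] : List Int) := by
        intro y _ _ h; exact (List.not_mem_nil h)
      have h1 := takeMiss_free [] (n + 1) start 0 hfree
      rw [Nat.add_zero, takeMiss_zero, add_zero] at h1
      simp only [bloop, hne, if_pos, ne_eq, not_false_eq_true]
      rw [series_closed start (n + 1), h1]
  | cons x bs ih =>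
    intro total start c hpw hge
    have hx : start ≤ x := hge x List.mem_cons_self
    have hpw' : bs.Pairwise (· < ·) := hpw.of_cons
    have hxlt : ∀ y ∈ bs, x < y := fun y hy => (List.pairwise_cons.mp hpw).1 y hy
    cases c with
    | zero => simp [bloop, takeMiss]
    | succ n =>
      have hcz : ((n + 1 : Nat) : Int) ≠ 0 := by push_cast; omega
      simp only [bloop, hcz, if_false]
      set cI : Int := ((n + 1 : Nat) : Int) with hcI
      by_cases hcase : x - start ≤ cI
      · -- take the whole gap
        have hg0 : 0 ≤ x - start := by omega
        set a : Nat := (x - start).toNat with ha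
        have haI : (a : Int) = x - start := Int.toNat_of_nonneg hg0
        have htake : min (x - start) cI = (a : Int) := by rw [haI]; omega
        have hale : a ≤ n + 1 := by omega
        set c' : Nat := n + 1 - a with hc'
        have hc'I : cI - (a : Int) = (c' : Int) := by push_cast; omega
        rw [htake, hc'I]
        rw [ih _ (x + 1) c' hpw' (fun y hy => by have := hxlt y hy; omega)]
        have hdecomp : n + 1 = a + c' := by omega
        have hfree : ∀ y, start ≤ y → y < start + (a : Int) → y ∉ x :: bs := by
          intro y h1 h2 hmem
          rw [haI] at h2
          rcases List.mem_cons.mp hmem with h | h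
          · omega
          · have := hxlt y h; omega
        have h1 : takeMiss (x :: bs) start (n + 1) =
            (∑ i ∈ Finset.range a, (start + (i : Int))) + takeMiss (x :: bs) (start + a) c' := by
          rw [hdecomp]; exact takeMiss_free _ a start c' hfree
        have hsx : start + (a : Int) = x := by omega
        rw [hsx] at h1
        have h2 : takeMiss (x :: bs) x c' = takeMiss (x :: bs) (x + 1) c' :=
          takeMiss_mem_head _ x c' List.mem_cons_self
        have h3 : takeMiss (x :: bs) (x + 1) c' = takeMiss bs (x + 1) c' := by
          apply takeMiss_congr
          intro y hy
          simp only [List.mem_cons]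
          constructor
          · rintro (rfl | h); · omega
            · exact h
          · exact Or.inr
        rw [h1, h2, h3, series_closed start a]
        ring
      · -- gap bigger than remaining: take = remaining, loop ends
        have htake : min (x - start) cI = cI := by omega
        rw [htake]
        simp only [sub_self, bloop_zero]
        have hfree : ∀ y, start ≤ y → y < start + ((n + 1 : Nat) : Int) → y ∉ x :: bs := by
          intro y h1 h2 hmem
          rcases List.mem_cons.mp hmem with h | h
          · omega
          · have := hxlt y h; omega
        have h1 := takeMiss_free (x :: bs) (n + 1) start 0 hfree
        rw [Nat.add_zero, takeMiss_zero, add_zero] at h1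
        rw [h1, hcI, series_closed start (n + 1)]

-- A's fold over the set, characterised
theorem foldA_eq (s : List Int) (k : Int) :
    ∀ (L : List Int) (curr acc : Int),
    (L.foldl (stepA s k) (curr, acc)).2 =
      acc - (L.filter (fun x => decide (x ≤ k))).sum +
        takeMiss s curr (L.filter (fun x => decide (x ≤ k))).length := by
  intro L
  induction L with
  | nil => intro curr acc; simp [takeMiss]
  | cons num L ih =>
    intro curr acc
    by_cases h : num ≤ k
    · simp only [List.foldl_cons, stepA, if_pos h]
      rw [ih]
      simp only [List.filter_cons, h, decide_true, if_pos]
      simp only [List.sum_cons, List.length_cons, takeMiss]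
      ring
    · simp only [List.foldl_cons, stepA, if_neg h]
      rw [ih]
      simp [h]

-- ===== VERDICT (by name: the statement is the Claim_ definition above) =====
theorem minimalKSum_spec : Claim_equal_minimalKSum := by
  intro nums k _
  unfold Spec_minimalKSum minimalKSum minimalKSum_alt
  set S : List Int := PySem.Set.ofList nums with hS
  set present : List Int := PySem.List.sorted S (fun x => x) false with hpres
  have hperm : present.Perm S := PySem.List.sorted_perm S (fun x => x) false
  set low : List Int := present.filter (fun x => decide (x ≤ k)) with hlow
  set big : List Int := present.filter (fun x => decide (k < x)) with hbig
  have hpermf : (present.filter (fun x => decide (x ≤ k))).Perm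
      (S.filter (fun x => decide (x ≤ k))) := hperm.filter _
  have hsum : low.sum = (S.filter (fun x => decide (x ≤ k))).sum := hpermf.sum_eq
  have hlen : low.length = (S.filter (fun x => decide (x ≤ k))).length := hpermf.length_eq
  have hbigpw : big.Pairwise (· < ·) :=
    (PySem.List.sorted_ofList_pairwise_lt nums).filter _
  have hbigge : ∀ x ∈ big, k + 1 ≤ x := by
    intro x hx
    rw [hbig, List.mem_filter] at hx
    have := hx.2; simp at this; omega
  rw [foldA_eq, bloop_eq big _ (k + 1) low.length hbigpw hbigge]
  have hcongr : takeMiss big (k + 1) low.length = takeMiss S (k + 1) low.length := by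
    apply takeMiss_congr
    intro y hy
    rw [hbig, List.mem_filter]
    constructor
    · intro h; exact hperm.mem_iff.mp h.1
    · intro h
      exact ⟨hperm.mem_iff.mpr h, by simp; omega⟩
  rw [hcongr, hsum, hlen]
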